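-- pv_equiv track=rewrite | github.com/stakehouse-dev/client-diversity-monitor | background_tasks.py | explode_gaps
-- ===== SOURCE A (Python) =====
-- def explode_gap(start_slot, end_slot, sprp):
--     next_boundary = (start_slot // sprp + 1) * sprp
--
--     if end_slot > next_boundary:
--         return [(start_slot, next_boundary)] + explode_gap(
--             next_boundary + 1, end_slot, sprp
--         )
--     else:
--         return [(start_slot, end_slot)]
--
-- def explode_gaps(gaps, sprp=300):
--     """
--     Divide sync gaps into manageable chunks aligned to Lighthouse's restore points
--     Also for memory efficiency, we don't want to load the entire gap into memory
--     """
--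
--     exploded = []
--
--     new_gaps = []
--     # For each gap, add their start and end slots to the list of gaps
--     for gap in gaps:
--         for slot in range(int(gap["start"]), int(gap["end"]) + 1, sprp):
--             new_gaps.append({"start": slot, "end": slot + sprp - 1})
--
--     gaps = new_gaps
--
--     for gap in gaps:
--         start_slot = int(gap["start"])
--         end_slot = int(gap["end"])
--
--         exploded.extend(explode_gap(start_slot, end_slot, sprp))
--
--     return exploded
-- ===== SOURCE B (Python) =====
-- def explode_gaps(gaps, sprp=300):
--     """
--     Divide sync gaps into manageable chunks aligned to Lighthouse's restore points.
--     Single pass: each width-(sprp-1) chunk crosses at most one restore-point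
--     boundary, so the split is computed directly instead of via a recursive helper.
--     """
--     exploded = []
--     for gap in gaps:
--         for slot in range(int(gap["start"]), int(gap["end"]) + 1, sprp):
--             b = (slot // sprp + 1) * sprp
--             e = slot + sprp - 1
--             if e > b:
--                 exploded.append((slot, b))
--                 exploded.append((b + 1, e))
--             else:
--                 exploded.append((slot, e))
--     return exploded
-- ===== Notes on version B (the rewrite author's own statement) =====
-- stated objective: simpler
-- what changed: B drops A's intermediate new_gaps list of dicts and the recursive explode_gap helper; one nested loop splits each width-(sprp-1) chunk directly at its unique restore-point boundary.
import Mathlib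
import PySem

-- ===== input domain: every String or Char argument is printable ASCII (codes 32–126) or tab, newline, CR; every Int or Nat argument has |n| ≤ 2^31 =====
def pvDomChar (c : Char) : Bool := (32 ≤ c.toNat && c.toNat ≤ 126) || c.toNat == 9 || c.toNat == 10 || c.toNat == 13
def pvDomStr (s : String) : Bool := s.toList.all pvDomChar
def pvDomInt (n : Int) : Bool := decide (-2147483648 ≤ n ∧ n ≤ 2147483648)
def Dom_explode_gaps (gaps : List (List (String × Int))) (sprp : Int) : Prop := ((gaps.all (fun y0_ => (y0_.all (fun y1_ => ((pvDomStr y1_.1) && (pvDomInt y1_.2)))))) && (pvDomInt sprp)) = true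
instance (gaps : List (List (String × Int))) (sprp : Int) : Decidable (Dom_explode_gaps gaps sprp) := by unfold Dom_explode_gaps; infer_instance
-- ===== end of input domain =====

-- B replaces A's intermediate new_gaps list and recursive helper by one loop that
-- splits each chunk directly at its (unique) restore-point boundary (objective: simpler).

-- ===== PORT A =====
-- shared helper: gap["k"] first-match lookup (Python raises KeyError when missing; Pre_ excludes that)
def pvLookup (gap : List (String × Int)) (k : String) : Int :=
  ((gap.find? (fun p => p.1 == k)).map (·.2)).getD 0

-- literal port of A's recursive explode_gap; fuel only makes it total (never exhausted under Pre_)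
def explode_gap (fuel : Nat) (start_slot end_slot sprp : Int) : List (Int × Int) :=
  match fuel with
  | 0 => []
  | fuel + 1 =>
    let next_boundary := (PySem.Int.floordiv start_slot sprp + 1) * sprp
    if next_boundary < end_slot then
      (start_slot, next_boundary) :: explode_gap fuel (next_boundary + 1) end_slot sprp
    else
      [(start_slot, end_slot)]

def explode_gaps (gaps : List (List (String × Int))) (sprp : Int) : List (Int × Int) :=
  let new_gaps : List (List (String × Int)) :=
    gaps.foldl (fun ng gap =>
      (PySem.List.pyRange (pvLookup gap "start") (pvLookup gap "end" + 1) sprp).foldl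
        (fun ng slot => ng ++ [[("start", slot), ("end", slot + sprp - 1)]]) ng) []
  new_gaps.foldl (fun ex gap =>
    let start_slot := pvLookup gap "start"
    let end_slot := pvLookup gap "end"
    ex ++ explode_gap ((end_slot - start_slot).toNat + 1) start_slot end_slot sprp) []

-- ===== PORT B =====
def explode_gaps_alt (gaps : List (List (String × Int))) (sprp : Int) : List (Int × Int) :=
  gaps.foldl (fun ex gap =>
    (PySem.List.pyRange (pvLookup gap "start") (pvLookup gap "end" + 1) sprp).foldl
      (fun ex slot =>
        let b := (PySem.Int.floordiv slot sprp + 1) * sprp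
        let e := slot + sprp - 1
        if b < e then ex ++ [(slot, b)] ++ [(b + 1, e)] else ex ++ [(slot, e)]) ex) []

-- ===== PRECONDITION & SPEC =====
-- Pre_ excludes exactly the inputs where the Python A raises: sprp = 0 (ValueError from range)
-- reached only when gaps is nonempty, and a gap missing the "start" or "end" key (KeyError).
def Pre_explode_gaps (gaps : List (List (String × Int))) (sprp : Int) : Prop :=
  (gaps ≠ [] → sprp ≠ 0) ∧ ∀ gap ∈ gaps,
    (gap.find? (fun p => p.1 == "start")).isSome ∧ (gap.find? (fun p => p.1 == "end")).isSome
instance (gaps : List (List (String × Int))) (sprp : Int) : Decidable (Pre_explode_gaps gaps sprp) := by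
  unfold Pre_explode_gaps; infer_instance
def pvWitness_explode_gaps : (List (List (String × Int))) × Int := ([[("start", 1), ("end", 700)]], 300)

def Spec_explode_gaps (gaps : List (List (String × Int))) (sprp : Int) (out : List (Int × Int)) : Prop := out = explode_gaps_alt gaps sprp
instance (gaps : List (List (String × Int))) (sprp : Int) (out : List (Int × Int)) : Decidable (Spec_explode_gaps gaps sprp out) := by unfold Spec_explode_gaps; infer_instance

-- ===== CLAIM (what is proved, stated in full; the proofs are below) =====
def Claim_equal_explode_gaps : Prop := ∀ (gaps : List (List (String × Int))) (sprp : Int), Dom_explode_gaps gaps sprp → Pre_explode_gaps gaps sprp → Spec_explode_gaps gaps sprp (explode_gaps gaps sprp)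

-- ===== LEMMAS AND PROOFS =====

-- B's per-slot chunk
def pvChunk (sprp slot : Int) : List (Int × Int) :=
  let b := (PySem.Int.floordiv slot sprp + 1) * sprp
  let e := slot + sprp - 1
  if b < e then [(slot, b), (b + 1, e)] else [(slot, e)]

-- A's recursive helper on a width-(sprp-1) chunk bottoms out after at most one split
lemma explode_gap_chunk (slot sprp : Int) (hs : sprp ≠ 0) :
    explode_gap ((slot + sprp - 1 - slot).toNat + 1) slot (slot + sprp - 1) sprp
      = pvChunk sprp slot := by
  have hqr := PySem.Int.floordiv_mul_add_mod slot sprp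
  set q := PySem.Int.floordiv slot sprp with hq
  set r := PySem.Int.mod slot sprp with hr
  have hb : (q + 1) * sprp = slot - r + sprp := by linarith [hqr]
  by_cases hlt : (q + 1) * sprp < slot + sprp - 1
  · -- split case: forces sprp ≥ 3 (so 0 < sprp) and r ≥ 2
    have hr2 : 1 < r := by omega
    have hpos : 0 < sprp := by
      rcases lt_or_gt_of_ne hs with hneg | hpos
      · have := (PySem.Int.mod_neg_bounds slot hneg).2; rw [← hr] at this; omega
      · exact hpos
    have hrlt : r < sprp := by have := PySem.Int.mod_lt slot hpos; rw [← hr] at this; exact this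
    have hsp3 : 3 ≤ sprp := by omega
    have hfuel : (slot + sprp - 1 - slot).toNat + 1 = ((sprp - 2).toNat + 1) + 1 := by omega
    rw [hfuel]
    simp only [explode_gap, ← hq, if_pos hlt]
    -- recursive call: next boundary of (q+1)*sprp + 1 is (q+2)*sprp ≥ end
    have hdiv : PySem.Int.floordiv ((q + 1) * sprp + 1) sprp = q + 1 := by
      rw [PySem.Int.floordiv_eq_iff_of_pos hpos]
      constructor
      · linarith
      · nlinarith
    have hnolt : ¬ ((PySem.Int.floordiv ((q + 1) * sprp + 1) sprp + 1) * sprp < slot + sprp - 1) := by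
      rw [hdiv]; nlinarith
    cases hn : (sprp - 2).toNat with
    | zero => omega
    | succ m =>
        simp only [explode_gap, if_neg hnolt, pvChunk, ← hq, if_pos hlt]
  · have hfuel : ∃ m, (slot + sprp - 1 - slot).toNat + 1 = m + 1 := ⟨_, rfl⟩
    obtain ⟨m, hm⟩ := hfuel
    rw [hm]
    simp only [explode_gap, ← hq, if_neg hlt, pvChunk]

-- the dict A builds for each slot looks up to exactly (slot, slot + sprp - 1)
lemma pvLookup_built (slot e : Int) :
    pvLookup [("start", slot), ("end", e)] "start" = slot ∧
    pvLookup [("start", slot), ("end", e)] "end" = e := by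
  constructor <;> simp [pvLookup, List.find?]

theorem explode_gaps_spec : Claim_equal_explode_gaps := by
  intro gaps sprp _hdom hpre
  rcases eq_or_ne gaps [] with hnil | hne
  · subst hnil; rfl
  have hs : sprp ≠ 0 := hpre.1 hne
  unfold Spec_explode_gaps explode_gaps explode_gaps_alt
  -- normalise A's phase-1 fold to a flatMap of maps
  have h1 : ∀ (init : List (List (String × Int))),
      gaps.foldl (fun ng gap =>
        (PySem.List.pyRange (pvLookup gap "start") (pvLookup gap "end" + 1) sprp).foldl
          (fun ng slot => ng ++ [[("start", slot), ("end", slot + sprp - 1)]]) ng) init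
      = init ++ gaps.flatMap (fun gap =>
          (PySem.List.pyRange (pvLookup gap "start") (pvLookup gap "end" + 1) sprp).map
            (fun slot => [("start", slot), ("end", slot + sprp - 1)])) := by
    intro init
    have := PySem.List.foldl_append_eq_flatMap
      (l := gaps) (acc := init)
      (g := fun gap =>
        (PySem.List.pyRange (pvLookup gap "start") (pvLookup gap "end" + 1) sprp).map
          (fun slot => [("start", slot), ("end", slot + sprp - 1)]))
    rw [← this]
    congr 1
    funext ng gap
    exact PySem.List.foldl_append_singleton_eq_map _ _ _
  rw [h1]
  simp only [List.nil_append]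
  rw [PySem.List.foldl_append_eq_flatMap, List.nil_append, List.flatMap_assoc]
  -- normalise B's nested fold to the same flatMap shape
  have h2 : gaps.foldl (fun ex gap =>
      (PySem.List.pyRange (pvLookup gap "start") (pvLookup gap "end" + 1) sprp).foldl
        (fun ex slot =>
          let b := (PySem.Int.floordiv slot sprp + 1) * sprp
          let e := slot + sprp - 1
          if b < e then ex ++ [(slot, b)] ++ [(b + 1, e)] else ex ++ [(slot, e)]) ex) []
      = gaps.flatMap (fun gap =>
          (PySem.List.pyRange (pvLookup gap "start") (pvLookup gap "end" + 1) sprp).flatMap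
            (pvChunk sprp)) := by
    have hinner : (fun (ex : List (Int × Int)) slot =>
          if (PySem.Int.floordiv slot sprp + 1) * sprp < slot + sprp - 1 then
            ex ++ [(slot, (PySem.Int.floordiv slot sprp + 1) * sprp)]
              ++ [((PySem.Int.floordiv slot sprp + 1) * sprp + 1, slot + sprp - 1)]
          else ex ++ [(slot, slot + sprp - 1)])
        = fun ex slot => ex ++ pvChunk sprp slot := by
      funext ex slot
      simp only [pvChunk, List.append_assoc]
      split <;> rfl
    rw [hinner]
    have houter : (fun (ex : List (Int × Int)) gap =>
          (PySem.List.pyRange (pvLookup gap "start") (pvLookup gap "end" + 1) sprp).foldl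
            (fun ex slot => ex ++ pvChunk sprp slot) ex)
        = fun ex gap => ex ++
            (PySem.List.pyRange (pvLookup gap "start") (pvLookup gap "end" + 1) sprp).flatMap
              (pvChunk sprp) := by
      funext ex gap
      exact PySem.List.foldl_append_eq_flatMap _ _ _
    rw [houter, PySem.List.foldl_append_eq_flatMap, List.nil_append]
  rw [h2]
  -- pointwise: A's phase-2 body on a built dict equals B's chunk
  congr 1
  funext gap
  rw [List.flatMap_map]
  congr 1
  funext slot
  rw [(pvLookup_built slot (slot + sprp - 1)).1, (pvLookup_built slot (slot + sprp - 1)).2]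
  exact explode_gap_chunk slot sprp hs
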